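-- pv_equiv track=rewrite | github.com/OlgaAvshister/computer_systems | translator.py | make_string_map
-- ===== SOURCE A (Python) =====
-- def make_string_map(lits: list[str]) -> dict[str, int]:
--     dic = {}
--     addr = 2  # first two address are reserved for input/output
--     for lit in lits:
--         if lit not in dic:
--             dic[lit] = addr
--             addr += len(lit) + 1
--     return dic
-- ===== SOURCE B (Python) =====
-- def make_string_map(lits: list[str]) -> dict[str, int]:
--     # Each first occurrence gets its address computed independently, with no
--     # running accumulator: 2 + total size (len+1) of the distinct literals
--     # strictly before it.
--     return {lit: 2 + sum(len(u) + 1 for u in set(lits[:i]))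
--             for i, lit in enumerate(lits)
--             if lit not in lits[:i]}
-- ===== Notes on version B (the rewrite author's own statement) =====
-- stated objective: alternative
-- what changed: Removes A's running dict+address state entirely: B is a stateless dict comprehension that keeps each first occurrence and computes its address independently as 2 plus the summed sizes of the distinct literals preceding it.
import Mathlib
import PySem

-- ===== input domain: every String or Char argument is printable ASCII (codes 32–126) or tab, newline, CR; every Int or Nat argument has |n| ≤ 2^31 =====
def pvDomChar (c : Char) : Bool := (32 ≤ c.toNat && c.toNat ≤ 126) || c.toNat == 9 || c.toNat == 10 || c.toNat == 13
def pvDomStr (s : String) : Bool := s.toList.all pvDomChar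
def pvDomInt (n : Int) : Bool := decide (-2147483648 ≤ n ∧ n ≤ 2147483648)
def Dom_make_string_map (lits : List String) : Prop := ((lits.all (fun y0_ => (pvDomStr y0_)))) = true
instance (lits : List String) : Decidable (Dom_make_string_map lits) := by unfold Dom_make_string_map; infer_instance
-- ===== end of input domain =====

-- B drops A's running dict+address state: a stateless comprehension keeps each first
-- occurrence and recomputes its address from scratch as 2 + Σ(len+1) over the distinct
-- earlier literals (alternative decomposition; same results, higher cost).

-- ===== PORT A =====
def make_string_map (lits : List String) : List (String × Int) :=
  (lits.foldl
    (fun (st : PySem.Dict String Int × Int) lit =>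
      if st.1.contains lit then st
      else (st.1.insert lit st.2, st.2 + (PySem.Str.len lit + 1)))
    (PySem.Dict.empty, 2)).1.items

-- ===== PORT B =====
-- The dict comprehension's filter keeps only first occurrences, so its keys are
-- distinct and the resulting dict is exactly the association list built by filterMap;
-- sum(... for u in set(lits[:i])) is ported as a fold over PySem.Set.ofList of the slice.
def make_string_map_alt (lits : List String) : List (String × Int) :=
  (PySem.List.enumerate lits 0).filterMap (fun p =>
    if (PySem.List.slice lits none (some p.1)).contains p.2 then none
    else some (p.2, 2 + (PySem.Set.ofList (PySem.List.slice lits none (some p.1))).foldl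
      (fun a u => a + (PySem.Str.len u + 1)) 0))

-- ===== PRECONDITION & SPEC =====
def Spec_make_string_map (lits : List String) (out : List (String × Int)) : Prop := out = make_string_map_alt lits
instance (lits : List String) (out : List (String × Int)) : Decidable (Spec_make_string_map lits out) := by unfold Spec_make_string_map; infer_instance

-- ===== CLAIM (what is proved, stated in full; the proofs are below) =====
def Claim_equal_make_string_map : Prop := ∀ (lits : List String), Dom_make_string_map lits → Spec_make_string_map lits (make_string_map lits)

-- ===== LEMMAS AND PROOFS =====

/-- The common denotation: pair each (already distinct) literal with its address. -/
def pvBuild (addr : Int) : List String → List (String × Int)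
  | [] => []
  | l :: ls => (l, addr) :: pvBuild (addr + (PySem.Str.len l + 1)) ls

/-- The new literals of `xs` (not in `seen`), first occurrences, in order. -/
def pvNew (seen : List String) : List String → List String
  | [] => []
  | l :: ls => if seen.contains l then pvNew seen ls else l :: pvNew (seen ++ [l]) ls

/-- Total size (len+1 each) of a list of literals, as B sums it. -/
def pvSsum (s : List String) : Int := s.foldl (fun a u => a + (PySem.Str.len u + 1)) 0

/-- Recursive form of B's comprehension: walk the suffix, carrying the raw prefix. -/
def pvGo (pre : List String) : List String → List (String × Int)
  | [] => []
  | l :: ls =>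
    if pre.contains l then pvGo (pre ++ [l]) ls
    else (l, 2 + pvSsum (PySem.Set.ofList pre)) :: pvGo (pre ++ [l]) ls

theorem pvSsum_append_singleton (s : List String) (l : String) :
    pvSsum (s ++ [l]) = pvSsum s + (PySem.Str.len l + 1) := by
  simp [pvSsum, List.foldl_append]

theorem pvSet_ofList_append_singleton (pre : List String) (l : String) :
    PySem.Set.ofList (pre ++ [l]) =
      if l ∈ pre then PySem.Set.ofList pre else PySem.Set.ofList pre ++ [l] := by
  have h1 : PySem.Set.ofList (pre ++ [l]) = PySem.Set.add (PySem.Set.ofList pre) l := by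
    simp [PySem.Set.ofList, List.foldl_append]
  by_cases h : l ∈ pre
  · have : l ∈ PySem.Set.ofList pre := (PySem.Set.mem_ofList _ _).2 h
    simp [h1, PySem.Set.add, this, h]
  · have : l ∉ PySem.Set.ofList pre := fun hm => h ((PySem.Set.mem_ofList _ _).1 hm)
    simp [h1, PySem.Set.add, this, h]

theorem pvGo_eq_build (xs : List String) : ∀ (pre : List String),
    pvGo pre xs = pvBuild (2 + pvSsum (PySem.Set.ofList pre)) (pvNew (PySem.Set.ofList pre) xs) := by
  induction xs with
  | nil => intro pre; simp [pvGo, pvNew, pvBuild]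
  | cons l ls ih =>
    intro pre
    by_cases h : l ∈ pre
    · have hs : l ∈ PySem.Set.ofList pre := (PySem.Set.mem_ofList _ _).2 h
      rw [pvGo, if_pos (by simpa using h), ih (pre ++ [l]),
        pvSet_ofList_append_singleton, if_pos h]
      simp [pvNew, hs]
    · have hs : l ∉ PySem.Set.ofList pre := fun hm => h ((PySem.Set.mem_ofList _ _).1 hm)
      rw [pvGo, if_neg (by simpa using h), ih (pre ++ [l]),
        pvSet_ofList_append_singleton, if_neg h, pvSsum_append_singleton]
      simp only [pvNew, List.contains_eq_mem, hs, decide_false, Bool.false_eq_true, if_false,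
        pvBuild]
      ring_nf

theorem pvAlt_eq_go (lits : List String) : ∀ (xs pre : List String), pre ++ xs = lits →
    (PySem.List.enumerate xs (pre.length : Int)).filterMap (fun p =>
      if (PySem.List.slice lits none (some p.1)).contains p.2 then none
      else some (p.2, 2 + (PySem.Set.ofList (PySem.List.slice lits none (some p.1))).foldl
        (fun a u => a + (PySem.Str.len u + 1)) 0)) = pvGo pre xs := by
  intro xs
  induction xs with
  | nil => intro pre _; simp [PySem.List.enumerate_nil, pvGo]
  | cons l ls ih =>
    intro pre hpre
    have hslice : PySem.List.slice lits none (some (pre.length : Int)) = pre := by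
      rw [PySem.List.slice_to_natCast, ← hpre]
      exact List.take_left
    have hlen : (pre.length : Int) + 1 = ((pre ++ [l]).length : Int) := by
      simp
    rw [PySem.List.enumerate_cons, List.filterMap_cons]
    by_cases h : l ∈ pre
    · rw [if_pos]
      · rw [hlen, ih (pre ++ [l]) (by simpa using hpre), pvGo, if_pos (by simpa using h)]
      · simp [hslice, h]
    · rw [if_neg]
      · rw [hlen, ih (pre ++ [l]) (by simpa using hpre), pvGo, if_neg (by simpa using h),
          hslice]
        rfl
      · simp [hslice, h]

theorem foldA_items (xs : List String) : ∀ (dic : PySem.Dict String Int) (addr : Int),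
    (List.foldl
      (fun (st : PySem.Dict String Int × Int) lit =>
        if st.1.contains lit then st
        else (st.1.insert lit st.2, st.2 + (PySem.Str.len lit + 1)))
      (dic, addr) xs).1.items = dic.items ++ pvBuild addr (pvNew dic.keys xs) := by
  induction xs with
  | nil => intro dic addr; simp [pvNew, pvBuild]
  | cons l ls ih =>
    intro dic addr
    by_cases h : dic.contains l
    · have hk : dic.keys.contains l = true := by
        simpa using (PySem.Dict.contains_iff_mem_keys dic l).mp h
      simp only [List.foldl_cons, h, if_true, pvNew, hk, ih]
    · have hk : l ∉ dic.keys := fun hm => h ((PySem.Dict.contains_iff_mem_keys dic l).mpr hm)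
      have hf : dic.contains l = false := by simpa using h
      simp only [List.foldl_cons, hf, Bool.false_eq_true, if_false,
        ih (dic.insert l addr) (addr + (PySem.Str.len l + 1)),
        PySem.Dict.items_insert_of_not_contains dic addr hf,
        PySem.Dict.keys_insert_of_not_contains dic addr hf]
      simp [pvNew, hk, pvBuild]

-- ===== VERDICT (by name: the statement is the Claim_ definition above) =====
theorem make_string_map_spec : Claim_equal_make_string_map := by
  intro lits _
  show make_string_map lits = make_string_map_alt lits
  have halt := pvAlt_eq_go lits lits [] rfl
  simp only [List.length_nil, Nat.cast_zero] at halt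
  rw [make_string_map, make_string_map_alt, foldA_items, halt, pvGo_eq_build]
  simp [pvSsum, PySem.Set.ofList, PySem.Dict.keys_empty]
  rfl
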